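-- pv_equiv track=rewrite | github.com/Merlness/AoC | 2015/day_3.py | santa_coordinates
-- ===== SOURCE A (Python) =====
-- def santa_coordinates(directions):
--     x = 0
--     y = 0
--     coordinates = [(x,y)]
--     for moves in directions:
--         if moves == '^':
--             y += 1
--             coordinates.append((x,y))
--         elif moves == 'v':
--             y -= 1
--             coordinates.append((x,y))
--         elif moves == '>':
--             x += 1
--             coordinates.append((x,y))
--         elif moves == '<':
--             x -= 1
--             coordinates.append((x,y))
--     return set(coordinates)
-- ===== SOURCE B (Python) =====
-- def santa_coordinates(directions):
--     # Stage 1: keep only the recognized arrow characters.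
--     moves = [c for c in directions if c in '^v<>']
--     # Stage 2: prefix-sum each axis independently (branch-free boolean arithmetic).
--     xs = [0]
--     for c in moves:
--         xs.append(xs[-1] + (c == '>') - (c == '<'))
--     ys = [0]
--     for c in moves:
--         ys.append(ys[-1] + (c == '^') - (c == 'v'))
--     # Stage 3: pair the per-axis coordinates back up.
--     return set(zip(xs, ys))
-- ===== Notes on version B (the rewrite author's own statement) =====
-- stated objective: alternative
-- what changed: Replaces A's fused four-way branching walk over a single (x,y) state by staged passes: filter to arrow characters, compute independent per-axis prefix sums with branch-free boolean arithmetic, then zip the axes back into positions before taking the set.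
import Mathlib
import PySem

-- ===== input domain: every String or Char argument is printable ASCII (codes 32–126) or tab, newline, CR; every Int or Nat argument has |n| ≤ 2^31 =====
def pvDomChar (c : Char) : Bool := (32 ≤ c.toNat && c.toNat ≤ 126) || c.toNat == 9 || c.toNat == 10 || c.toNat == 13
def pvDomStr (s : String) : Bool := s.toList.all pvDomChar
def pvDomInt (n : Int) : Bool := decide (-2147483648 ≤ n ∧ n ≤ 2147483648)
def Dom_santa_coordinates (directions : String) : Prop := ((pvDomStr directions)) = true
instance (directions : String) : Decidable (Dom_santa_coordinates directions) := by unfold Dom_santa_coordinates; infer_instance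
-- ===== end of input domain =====

-- B replaces A's fused four-way branching walk by staged passes: filter to arrows,
-- independent per-axis prefix sums, then zip the axes back into positions; same O(n) cost.


-- ===== PORT A =====
-- A's loop: state x, y and the growing coordinates list, one branch per arrow character.
def santaLoopA (x y : Int) (coords : List (Int × Int)) : List Char → List (Int × Int)
  | [] => coords
  | c :: cs =>
    if c = '^' then santaLoopA x (y + 1) (coords ++ [(x, y + 1)]) cs
    else if c = 'v' then santaLoopA x (y - 1) (coords ++ [(x, y - 1)]) cs
    else if c = '>' then santaLoopA (x + 1) y (coords ++ [(x + 1, y)]) cs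
    else if c = '<' then santaLoopA (x - 1) y (coords ++ [(x - 1, y)]) cs
    else santaLoopA x y coords cs

def santa_coordinates (directions : String) : List (Int × Int) :=
  PySem.Set.ofList (santaLoopA 0 0 [(0, 0)] directions.toList)

-- ===== PORT B =====
-- Source B's "c in '^v<>'" membership test
def isArrow (c : Char) : Bool := c = '^' || c = 'v' || c = '<' || c = '>'

-- Source B's branch-free per-step delta: (c == '>') - (c == '<') for the x-axis, etc.
def xDelta (c : Char) : Int := (if c = '>' then 1 else 0) - (if c = '<' then 1 else 0)
def yDelta (c : Char) : Int := (if c = '^' then 1 else 0) - (if c = 'v' then 1 else 0)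

-- Source B's prefix-sum loop: list seeded with `acc`, each step appends last + f c
def santaScan (f : Char → Int) (acc : Int) : List Char → List Int
  | [] => [acc]
  | c :: cs => acc :: santaScan f (acc + f c) cs

def santa_coordinates_alt (directions : String) : List (Int × Int) :=
  let moves := directions.toList.filter isArrow
  PySem.Set.ofList (List.zip (santaScan xDelta 0 moves) (santaScan yDelta 0 moves))

-- ===== PRECONDITION & SPEC =====
def Spec_santa_coordinates (directions : String) (out : List (Int × Int)) : Prop := out = santa_coordinates_alt directions
instance (directions : String) (out : List (Int × Int)) : Decidable (Spec_santa_coordinates directions out) := by unfold Spec_santa_coordinates; infer_instance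

-- ===== CLAIM (what is proved, stated in full; the proofs are below) =====
def Claim_equal_santa_coordinates : Prop := ∀ (directions : String), Dom_santa_coordinates directions → Spec_santa_coordinates directions (santa_coordinates directions)

-- ===== LEMMAS AND PROOFS =====

theorem zip_scan_head (a b : Int) (fx fy : Char → Int) (l : List Char) :
    List.zip (santaScan fx a l) (santaScan fy b l)
      = (a, b) :: (List.zip (santaScan fx a l) (santaScan fy b l)).tail := by
  cases l <;> simp [santaScan]

-- A's loop appends exactly the tail of B's zipped per-axis scans from the same position.
theorem santaLoopA_eq_scan (cs : List Char) :
    ∀ (x y : Int) (coords : List (Int × Int)),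
      santaLoopA x y coords cs =
        coords ++ (List.zip (santaScan xDelta x (cs.filter isArrow))
                            (santaScan yDelta y (cs.filter isArrow))).tail := by
  induction cs with
  | nil => intro x y coords; simp [santaLoopA, santaScan]
  | cons c cs ih =>
    intro x y coords
    by_cases h1 : c = '^'
    · subst h1
      simp [santaLoopA, santaScan, xDelta, yDelta, ih, isArrow]
      rw [zip_scan_head x (y + 1)]
      simp
    · by_cases h2 : c = 'v'
      · subst h2
        simp [santaLoopA, santaScan, xDelta, yDelta, ih, isArrow, sub_eq_add_neg]
        rw [zip_scan_head x (y + -1)]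
        simp
      · by_cases h3 : c = '>'
        · subst h3
          simp [santaLoopA, santaScan, xDelta, yDelta, ih, isArrow]
          rw [zip_scan_head (x + 1) y]
          simp
        · by_cases h4 : c = '<'
          · subst h4
            simp [santaLoopA, santaScan, xDelta, yDelta, ih, isArrow, sub_eq_add_neg]
            rw [zip_scan_head (x + -1) y]
            simp
          · simp [santaLoopA, h1, h2, h3, h4, ih, isArrow]

-- ===== VERDICT (by name: the statement is the Claim_ definition above) =====
theorem santa_coordinates_spec : Claim_equal_santa_coordinates := by
  intro directions _
  unfold Spec_santa_coordinates santa_coordinates santa_coordinates_alt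
  rw [santaLoopA_eq_scan]
  dsimp only
  conv_rhs => rw [zip_scan_head 0 0]
  rfl
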